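-- pv_equiv track=rewrite | github.com/10srav/Quantum-Annealing-Based-Mixed-Priority-Routing-Framework-for-Urban-Logistics | backend/tests/test_solver_correctness.py | verify_one_hot
-- ===== SOURCE A (Python) =====
-- def verify_one_hot(sample: dict, n_nodes: int) -> tuple[bool, str]:
--     """Verify one-hot constraints are satisfied in a sample.
--
--     Returns (satisfied, error_message).
--     """
--     # Check each position has exactly one node
--     for pos in range(n_nodes):
--         count = sum(1 for k, v in sample.items()
--                     if v == 1 and k.endswith(f"_{pos}"))
--         if count != 1:
--             return False, f"Position {pos} has {count} nodes (expected 1)"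
--
--     # Check each node appears exactly once
--     node_counts = {}
--     for key, val in sample.items():
--         if val == 1:
--             parts = key.split("_")
--             node_id = "_".join(parts[1:-1])
--             node_counts[node_id] = node_counts.get(node_id, 0) + 1
--
--     for node_id, count in node_counts.items():
--         if count != 1:
--             return False, f"Node {node_id} appears {count} times (expected 1)"
--
--     return True, ""
-- ===== SOURCE B (Python) =====
-- def verify_one_hot(sample: dict, n_nodes: int) -> tuple[bool, str]:
--     """Single pass over the sample building per-position-suffix and per-node
--     count dicts, then check positions in order by dict lookup."""
--     pos_counts = {}
--     node_counts = {}
--     for key, val in sample.items():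
--         if val == 1:
--             parts = key.split("_")
--             if len(parts) >= 2:
--                 suffix = parts[-1]
--                 pos_counts[suffix] = pos_counts.get(suffix, 0) + 1
--             node_id = "_".join(parts[1:-1])
--             node_counts[node_id] = node_counts.get(node_id, 0) + 1
--
--     for pos in range(n_nodes):
--         count = pos_counts.get(str(pos), 0)
--         if count != 1:
--             return False, f"Position {pos} has {count} nodes (expected 1)"
--
--     for node_id, count in node_counts.items():
--         if count != 1:
--             return False, f"Node {node_id} appears {count} times (expected 1)"
--
--     return True, ""
-- ===== Notes on version B (the rewrite author's own statement) =====
-- stated objective: alternative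
-- what changed: A rescans the whole sample once per position (matching keys by endswith); B makes a single pass over the sample, building count dicts keyed by the key's last '_'-separated component and by node id, then checks positions by dict lookup.
import Mathlib
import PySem

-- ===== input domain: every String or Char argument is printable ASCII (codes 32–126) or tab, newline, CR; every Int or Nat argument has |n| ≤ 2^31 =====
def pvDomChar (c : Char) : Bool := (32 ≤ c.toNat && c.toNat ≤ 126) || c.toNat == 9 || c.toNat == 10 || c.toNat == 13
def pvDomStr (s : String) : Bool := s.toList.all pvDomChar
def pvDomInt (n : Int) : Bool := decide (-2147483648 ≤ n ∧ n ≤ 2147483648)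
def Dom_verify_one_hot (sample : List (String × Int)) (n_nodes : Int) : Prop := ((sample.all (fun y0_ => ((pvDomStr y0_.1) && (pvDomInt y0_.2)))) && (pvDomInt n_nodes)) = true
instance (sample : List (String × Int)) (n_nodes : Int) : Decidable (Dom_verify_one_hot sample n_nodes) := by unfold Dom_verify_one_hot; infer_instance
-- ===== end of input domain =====

-- B replaces A's per-position rescan of the sample by one pass over the sample building
-- per-position-suffix and per-node count dicts, then checks positions by dict lookup.

-- ===== PORT A =====

-- f"Position {pos} has {count} nodes (expected 1)"
def pvMsgPos (pos count : Int) : String :=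
  "Position " ++ PySem.Int.toStr pos ++ " has " ++ PySem.Int.toStr count ++ " nodes (expected 1)"

-- f"Node {node_id} appears {count} times (expected 1)"
def pvMsgNode (node_id : List Char) (count : Int) : String :=
  "Node " ++ String.ofList node_id ++ " appears " ++ PySem.Int.toStr count ++ " times (expected 1)"

-- count = sum(1 for k, v in sample.items() if v == 1 and k.endswith(f"_{pos}"))
-- (Str.endswith s p = Chars.endswith s.toList p.toList definitionally; f"_{pos}" = '_' :: str(pos))
def pvCountPosA (sample : List (String × Int)) (pos : Int) : Int :=
  sample.foldl
    (fun acc kv =>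
      if kv.2 == 1 && PySem.Chars.endswith kv.1.toList ('_' :: PySem.Int.toChars pos) then acc + 1
      else acc) 0

-- the first position loop (range(n_nodes) consumed lazily, as Python does:
-- the first pos with count != 1 returns the error pair)
def pvCheckPositionsA (sample : List (String × Int)) (pos n_nodes : Int) : Option (Bool × String) :=
  if pos < n_nodes then
    let count := pvCountPosA sample pos
    if count ≠ 1 then some (false, pvMsgPos pos count)
    else pvCheckPositionsA sample (pos + 1) n_nodes
  else none
termination_by (n_nodes - pos).toNat
decreasing_by omega

-- node_counts accumulation (dict keyed by the node_id string, held as its char list)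
def pvNodeCountsA (sample : List (String × Int)) : PySem.Dict (List Char) Int :=
  sample.foldl
    (fun d kv =>
      if kv.2 == 1 then
        let parts := PySem.Chars.splitOn kv.1.toList ['_']          -- key.split("_")
        let node_id := PySem.Chars.join ['_'] (PySem.List.slice parts (some 1) (some (-1)))  -- "_".join(parts[1:-1])
        d.insert node_id (d.getD node_id 0 + 1)
      else d) PySem.Dict.empty

-- the node loop over node_counts.items()
def pvCheckNodesA : List ((List Char) × Int) → Option (Bool × String)
  | [] => none
  | (node_id, count) :: rest =>
      if count ≠ 1 then some (false, pvMsgNode node_id count)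
      else pvCheckNodesA rest

def verify_one_hot (sample : List (String × Int)) (n_nodes : Int) : Bool × String :=
  match pvCheckPositionsA sample 0 n_nodes with
  | some r => r
  | none =>
      match pvCheckNodesA (pvNodeCountsA sample).items with
      | some r => r
      | none => (true, "")

-- ===== PORT B =====

-- the single pass: builds (pos_counts, node_counts) together
def pvBuildB (sample : List (String × Int)) :
    PySem.Dict (List Char) Int × PySem.Dict (List Char) Int :=
  sample.foldl
    (fun st kv =>
      if kv.2 == 1 then
        let parts := PySem.Chars.splitOn kv.1.toList ['_']          -- key.split("_")
        let pd :=
          if 2 ≤ parts.length then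
            let suffix := PySem.List.pyGetD parts (-1) []           -- parts[-1]
            st.1.insert suffix (st.1.getD suffix 0 + 1)
          else st.1
        let node_id := PySem.Chars.join ['_'] (PySem.List.slice parts (some 1) (some (-1)))  -- "_".join(parts[1:-1])
        (pd, st.2.insert node_id (st.2.getD node_id 0 + 1))
      else st) (PySem.Dict.empty, PySem.Dict.empty)

-- for pos in range(n_nodes): count = pos_counts.get(str(pos), 0)  (range consumed lazily)
def pvCheckPositionsB (pd : PySem.Dict (List Char) Int) (pos n_nodes : Int) : Option (Bool × String) :=
  if pos < n_nodes then
    let count := pd.getD (PySem.Int.toChars pos) 0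
    if count ≠ 1 then some (false, pvMsgPos pos count)
    else pvCheckPositionsB pd (pos + 1) n_nodes
  else none
termination_by (n_nodes - pos).toNat
decreasing_by omega

def pvCheckNodesB : List ((List Char) × Int) → Option (Bool × String)
  | [] => none
  | (node_id, count) :: rest =>
      if count ≠ 1 then some (false, pvMsgNode node_id count)
      else pvCheckNodesB rest

def verify_one_hot_alt (sample : List (String × Int)) (n_nodes : Int) : Bool × String :=
  let st := pvBuildB sample
  match pvCheckPositionsB st.1 0 n_nodes with
  | some r => r
  | none =>
      match pvCheckNodesB st.2.items with
      | some r => r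
      | none => (true, "")

-- ===== PRECONDITION & SPEC =====
def Spec_verify_one_hot (sample : List (String × Int)) (n_nodes : Int) (out : Bool × String) : Prop := out = verify_one_hot_alt sample n_nodes
instance (sample : List (String × Int)) (n_nodes : Int) (out : Bool × String) : Decidable (Spec_verify_one_hot sample n_nodes out) := by unfold Spec_verify_one_hot; infer_instance

-- ===== CLAIM (what is proved, stated in full; the proofs are below) =====
def Claim_equal_verify_one_hot : Prop := ∀ (sample : List (String × Int)) (n_nodes : Int), Dom_verify_one_hot sample n_nodes → Spec_verify_one_hot sample n_nodes (verify_one_hot sample n_nodes)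

-- ===== LEMMAS AND PROOFS =====

def pvSplitU : List Char → List (List Char)
  | [] => [[]]
  | c :: rest => if c = '_' then [] :: pvSplitU rest else (pvSplitU rest).modifyHead (c :: ·)

theorem pvSplitU_ne_nil (l : List Char) : pvSplitU l ≠ [] := by
  induction l with
  | nil => simp [pvSplitU]
  | cons c rest ih =>
    simp only [pvSplitU]
    split
    · simp
    · cases h : pvSplitU rest with
      | nil => exact absurd h ih
      | cons p ps => simp

theorem pv_go_eq (fuel : Nat) : ∀ (l cur : List Char) (acc : List (List Char)), l.length < fuel →
    PySem.Chars.splitOn.go ['_'] fuel l cur acc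
      = acc.reverse ++ (pvSplitU l).modifyHead (cur.reverse ++ ·) := by
  induction fuel with
  | zero => intro l cur acc h; omega
  | succ n ih =>
    intro l cur acc h
    cases l with
    | nil => simp [PySem.Chars.splitOn.go, pvSplitU]
    | cons c rest =>
      rw [PySem.Chars.splitOn.go]
      by_cases hc : c = '_'
      · subst hc
        have hpre : (['_'].isPrefixOf ('_' :: rest)) = true := by simp [List.isPrefixOf]
        rw [hpre]
        simp only [if_true, List.length_singleton, List.drop_succ_cons, List.drop_zero]
        rw [ih rest [] _ (by simpa using h)]
        simp only [pvSplitU, List.reverse_nil, List.nil_append]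
        cases hsp : pvSplitU rest <;> simp
      · have hpre : (['_'].isPrefixOf (c :: rest)) = false := by
          simp [List.isPrefixOf]
          exact fun hh => absurd hh.symm hc
        rw [hpre]
        simp only [Bool.false_eq_true, if_false]
        rw [ih rest (c :: cur) acc (by simpa using h)]
        simp only [pvSplitU, if_neg hc, List.reverse_cons]
        cases hsp : pvSplitU rest with
        | nil => exact absurd hsp (pvSplitU_ne_nil rest)
        | cons p ps => simp

theorem pvSplitOn_eq_splitU (l : List Char) :
    PySem.Chars.splitOn l ['_'] = pvSplitU l := by
  rw [PySem.Chars.splitOn, pv_go_eq (l.length + 1) l [] [] (by omega)]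
  cases h : pvSplitU l <;> simp

theorem pv_modifyHead_getLast? {α : Type} (l : List α) (f : α → α) (h : 2 ≤ l.length) :
    (l.modifyHead f).getLast? = l.getLast? := by
  cases l with
  | nil => simp at h
  | cons a t =>
    cases t with
    | nil => simp at h
    | cons b t2 => simp [List.getLast?_cons_cons]

theorem pv_length_modifyHead {α : Type} (l : List α) (f : α → α) :
    (l.modifyHead f).length = l.length := by
  cases l <;> simp

theorem pv_getLast?_cons_of_ne_nil {α : Type} (a : α) (l : List α) (h : l ≠ []) :
    (a :: l).getLast? = l.getLast? := by
  cases l with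
  | nil => exact absurd rfl h
  | cons b t => simp [List.getLast?_cons_cons]

theorem pvSplitU_cons_sep (rest : List Char) : pvSplitU ('_' :: rest) = [] :: pvSplitU rest := by
  simp [pvSplitU]

theorem pvSplitU_no_sep (ys : List Char) (h : '_' ∉ ys) : pvSplitU ys = [ys] := by
  induction ys with
  | nil => simp [pvSplitU]
  | cons c rest ih =>
    simp only [List.mem_cons, not_or] at h
    have hc : ¬ c = '_' := fun hh => h.1 hh.symm
    simp [pvSplitU, hc, ih h.2]

theorem pvSplitU_mem_sep (ys : List Char) (h : '_' ∈ ys) : 2 ≤ (pvSplitU ys).length := by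
  induction ys with
  | nil => simp at h
  | cons c rest ih =>
    by_cases hc : c = '_'
    · simp only [pvSplitU, if_pos hc, List.length_cons]
      have := List.length_pos_iff.mpr (pvSplitU_ne_nil rest)
      omega
    · have hr : '_' ∈ rest := by
        rcases List.mem_cons.mp h with h1 | h2
        · exact absurd h1.symm hc
        · exact h2
      simp only [pvSplitU, if_neg hc]
      rw [pv_length_modifyHead]
      exact ih hr

theorem pvSplitU_append (xs ys : List Char) (h : '_' ∉ ys) :
    2 ≤ (pvSplitU (xs ++ '_' :: ys)).length ∧ (pvSplitU (xs ++ '_' :: ys)).getLast? = some ys := by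
  induction xs with
  | nil =>
    rw [List.nil_append, pvSplitU_cons_sep, pvSplitU_no_sep ys h]
    simp
  | cons c xs ih =>
    by_cases hc : c = '_'
    · subst hc
      rw [List.cons_append, pvSplitU_cons_sep]
      refine ⟨by simp; omega, ?_⟩
      rw [pv_getLast?_cons_of_ne_nil _ _ (pvSplitU_ne_nil _)]
      exact ih.2
    · simp only [List.cons_append, pvSplitU, if_neg hc]
      rw [pv_length_modifyHead, pv_modifyHead_getLast? _ _ ih.1]
      exact ⟨ih.1, ih.2⟩

theorem pvSplitU_decomp (k : List Char) (h : 2 ≤ (pvSplitU k).length) :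
    ∃ xs ys, k = xs ++ '_' :: ys ∧ '_' ∉ ys ∧ (pvSplitU k).getLast? = some ys := by
  induction k with
  | nil => simp [pvSplitU] at h
  | cons c rest ih =>
    by_cases hc : c = '_'
    · subst hc
      by_cases hr : 2 ≤ (pvSplitU rest).length
      · obtain ⟨xs, ys, hk, hys, hl⟩ := ih hr
        exact ⟨'_' :: xs, ys, by rw [hk]; simp, hys, by
          rw [pvSplitU_cons_sep, pv_getLast?_cons_of_ne_nil _ _ (pvSplitU_ne_nil _)]; exact hl⟩
      · have hnr : '_' ∉ rest := fun hmem => hr (pvSplitU_mem_sep rest hmem)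
        exact ⟨[], rest, rfl, hnr, by
          rw [pvSplitU_cons_sep, pvSplitU_no_sep rest hnr]; simp⟩
    · simp only [pvSplitU, if_neg hc, pv_length_modifyHead] at h
      obtain ⟨xs, ys, hk, hys, hl⟩ := ih h
      refine ⟨c :: xs, ys, by rw [hk]; simp, hys, ?_⟩
      simp only [pvSplitU, if_neg hc]
      rw [pv_modifyHead_getLast? _ _ h]
      exact hl

theorem pv_endswith_iff (k s : List Char) (hs : '_' ∉ s) :
    ('_' :: s) <:+ k ↔ 2 ≤ (pvSplitU k).length ∧ (pvSplitU k).getLast? = some s := by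
  constructor
  · rintro ⟨pre, rfl⟩
    exact pvSplitU_append pre s hs
  · rintro ⟨hlen, hlast⟩
    obtain ⟨xs, ys, hk, hys, hl⟩ := pvSplitU_decomp k hlen
    rw [hl] at hlast
    obtain rfl : ys = s := by injection hlast
    exact ⟨xs, hk.symm⟩


-- '_' is not a character of str(pos) for pos ≥ 0
theorem pv_underscore_not_toChars (pos : Int) (h : 0 ≤ pos) : '_' ∉ PySem.Int.toChars pos := by
  intro hm
  rw [PySem.Int.toChars, if_neg (by omega)] at hm
  have hd := Nat.isDigit_of_mem_toDigits (b := 10) (by norm_num) (by norm_num) hm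
  exact absurd hd (by decide)

-- the standalone pos_counts fold (proof device; B computes it as the first pair component)
def pvPosFold (sample : List (String × Int)) (d : PySem.Dict (List Char) Int) :
    PySem.Dict (List Char) Int :=
  sample.foldl
    (fun d kv =>
      if kv.2 == 1 then
        let parts := PySem.Chars.splitOn kv.1.toList ['_']
        if 2 ≤ parts.length then
          let suffix := PySem.List.pyGetD parts (-1) []
          d.insert suffix (d.getD suffix 0 + 1)
        else d
      else d) d

theorem pvBuildB_eq (sample : List (String × Int)) :
    ∀ (p n : PySem.Dict (List Char) Int),
      sample.foldl
        (fun st kv =>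
          if kv.2 == 1 then
            let parts := PySem.Chars.splitOn kv.1.toList ['_']
            let pd :=
              if 2 ≤ parts.length then
                let suffix := PySem.List.pyGetD parts (-1) []
                st.1.insert suffix (st.1.getD suffix 0 + 1)
              else st.1
            let node_id := PySem.Chars.join ['_'] (PySem.List.slice parts (some 1) (some (-1)))
            (pd, st.2.insert node_id (st.2.getD node_id 0 + 1))
          else st) (p, n)
      = (pvPosFold sample p,
         sample.foldl
           (fun d kv =>
             if kv.2 == 1 then
               let parts := PySem.Chars.splitOn kv.1.toList ['_']
               let node_id := PySem.Chars.join ['_'] (PySem.List.slice parts (some 1) (some (-1)))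
               d.insert node_id (d.getD node_id 0 + 1)
             else d) n) := by
  induction sample with
  | nil => intro p n; simp [pvPosFold]
  | cons kv rest ih =>
    intro p n
    by_cases h1 : kv.2 == 1
    · simp only [List.foldl_cons, pvPosFold, h1, if_true]
      exact ih _ _
    · simp only [List.foldl_cons, pvPosFold, h1, Bool.false_eq_true, if_false]
      exact ih p n

-- the per-key predicate B effectively counts
def pvPredB (pos : Int) (kv : String × Int) : Bool :=
  kv.2 == 1 && decide
    (2 ≤ (PySem.Chars.splitOn kv.1.toList ['_']).length ∧
     PySem.List.pyGetD (PySem.Chars.splitOn kv.1.toList ['_']) (-1) [] = PySem.Int.toChars pos)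

theorem pvPosFold_getD (pos : Int) (sample : List (String × Int)) :
    ∀ d : PySem.Dict (List Char) Int,
      (pvPosFold sample d).getD (PySem.Int.toChars pos) 0
        = d.getD (PySem.Int.toChars pos) 0 + (sample.countP (pvPredB pos) : Int) := by
  induction sample with
  | nil => intro d; simp [pvPosFold]
  | cons kv rest ih =>
    intro d
    simp only [pvPosFold, List.foldl_cons] at ih ⊢
    rw [List.countP_cons]
    by_cases h1 : kv.2 == 1
    · rw [if_pos h1]
      by_cases h2 : 2 ≤ (PySem.Chars.splitOn kv.1.toList ['_']).length
      · rw [if_pos h2]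
        by_cases h3 : PySem.List.pyGetD (PySem.Chars.splitOn kv.1.toList ['_']) (-1) []
            = PySem.Int.toChars pos
        · rw [ih, PySem.Dict.getD_insert, if_pos h3.symm,
            if_pos (show pvPredB pos kv = true by simp [pvPredB, h1, h2, h3])]
          rw [h3]; push_cast; ring
        · rw [ih, PySem.Dict.getD_insert, if_neg (fun hh => h3 hh.symm),
            if_neg (show ¬ pvPredB pos kv = true by simp [pvPredB, h3])]
          push_cast; ring
      · rw [if_neg h2, ih, if_neg (show ¬ pvPredB pos kv = true by simp [pvPredB, h2])]
        push_cast; ring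
    · rw [if_neg (by simpa using h1), ih,
        if_neg (show ¬ pvPredB pos kv = true by simp [pvPredB, h1])]
      push_cast; ring

-- A's per-position count equals B's dict lookup
theorem pv_count_eq (sample : List (String × Int)) (pos : Int) (h : 0 ≤ pos) :
    pvCountPosA sample pos = (pvPosFold sample PySem.Dict.empty).getD (PySem.Int.toChars pos) 0 := by
  rw [pvPosFold_getD, PySem.Dict.getD_empty]
  rw [pvCountPosA, PySem.List.foldl_count_if]
  have hpred : ∀ kv : String × Int,
      (kv.2 == 1 && PySem.Chars.endswith kv.1.toList ('_' :: PySem.Int.toChars pos))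
        = pvPredB pos kv := by
    intro kv
    rw [pvPredB]
    by_cases h1 : kv.2 == 1
    · rw [h1, Bool.true_and, Bool.true_and]
      rw [Bool.eq_iff_iff, decide_eq_true_eq]
      rw [PySem.Chars.endswith_iff,
        pv_endswith_iff _ _ (pv_underscore_not_toChars pos h), pvSplitOn_eq_splitU]
      constructor
      · rintro ⟨hl, hlast⟩
        refine ⟨hl, ?_⟩
        rw [PySem.List.pyGetD_neg_one _ _ (pvSplitU_ne_nil _)]
        rw [List.getLast?_eq_some_getLast (pvSplitU_ne_nil _)] at hlast
        injection hlast
      · rintro ⟨hl, hget⟩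
        refine ⟨hl, ?_⟩
        rw [PySem.List.pyGetD_neg_one _ _ (pvSplitU_ne_nil _)] at hget
        rw [List.getLast?_eq_some_getLast (pvSplitU_ne_nil _), hget]
    · have h1' : (kv.2 == 1) = false := by simpa using h1
      rw [h1', Bool.false_and, Bool.false_and]
  rw [List.countP_congr (fun kv _ => by rw [hpred kv])]

-- the two position-checking loops agree

theorem pv_checkPositions_eq (sample : List (String × Int)) (n_nodes : Int) :
    ∀ (k : Nat) (pos : Int), (n_nodes - pos).toNat = k → 0 ≤ pos →
      pvCheckPositionsA sample pos n_nodes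
        = pvCheckPositionsB (pvPosFold sample PySem.Dict.empty) pos n_nodes := by
  intro k
  induction k using Nat.strong_induction_on with
  | _ k ih =>
    intro pos hk h0
    rw [pvCheckPositionsA, pvCheckPositionsB]
    by_cases hlt : pos < n_nodes
    · rw [if_pos hlt, if_pos hlt, ← pv_count_eq sample pos h0]
      exact if_congr Iff.rfl rfl
        (ih (n_nodes - (pos + 1)).toNat (by omega) (pos + 1) rfl (by omega))
    · rw [if_neg hlt, if_neg hlt]

-- the two node-checking loops agree
theorem pv_checkNodes_eq : ∀ l : List ((List Char) × Int), pvCheckNodesA l = pvCheckNodesB l := by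
  intro l
  induction l with
  | nil => rfl
  | cons kv rest ih =>
    obtain ⟨node_id, count⟩ := kv
    rw [pvCheckNodesA, pvCheckNodesB, ih]

-- ===== VERDICT (by name: the statement is the Claim_ definition above) =====
theorem verify_one_hot_spec : Claim_equal_verify_one_hot := by
  intro sample n_nodes _
  have hb : pvBuildB sample = (pvPosFold sample PySem.Dict.empty, pvNodeCountsA sample) := by
    unfold pvBuildB pvNodeCountsA
    exact pvBuildB_eq sample PySem.Dict.empty PySem.Dict.empty
  unfold Spec_verify_one_hot verify_one_hot verify_one_hot_alt
  simp only [hb]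
  rw [← pv_checkPositions_eq sample n_nodes _ 0 rfl (by omega), pv_checkNodes_eq]
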